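-- pv_equiv track=rewrite | github.com/SamuelWyck/Structy-Algorithms-Code | Mixed_Review/token_replace.py | token_replace
-- ===== SOURCE A (Python) =====
-- def token_replace(s, tokens):
--   i = 0
--   j = 1
--   result = ""
--   while i < len(s):
--     if s[i] != "$":
--       result += s[i]
--       i += 1
--       j = i + 1
--     elif s[j] != "$":
--       j += 1
--     else:
--       word = s[i:j + 1]
--       word = tokens[word]
--       result += word
--       i = j + 1
--       j = i + 1
--   return result
-- ===== SOURCE B (Python) =====
-- def token_replace(s, tokens):
--     parts = s.split("$")
--     pieces = [parts[0]]
--     for i in range(1, len(parts), 2):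
--         nxt = parts[i + 1]
--         pieces.append(tokens["$" + parts[i] + "$"])
--         pieces.append(nxt)
--     return "".join(pieces)
-- ===== Notes on version B (the rewrite author's own statement) =====
-- stated objective: faster
-- what changed: A's two-pointer character-by-character scan with per-character string concatenation is replaced by splitting the string on '$' once and doing a single pairwise pass over the segments (odd index: dict lookup of "$seg$", even index: literal text), joined at the end.
import Mathlib
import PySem

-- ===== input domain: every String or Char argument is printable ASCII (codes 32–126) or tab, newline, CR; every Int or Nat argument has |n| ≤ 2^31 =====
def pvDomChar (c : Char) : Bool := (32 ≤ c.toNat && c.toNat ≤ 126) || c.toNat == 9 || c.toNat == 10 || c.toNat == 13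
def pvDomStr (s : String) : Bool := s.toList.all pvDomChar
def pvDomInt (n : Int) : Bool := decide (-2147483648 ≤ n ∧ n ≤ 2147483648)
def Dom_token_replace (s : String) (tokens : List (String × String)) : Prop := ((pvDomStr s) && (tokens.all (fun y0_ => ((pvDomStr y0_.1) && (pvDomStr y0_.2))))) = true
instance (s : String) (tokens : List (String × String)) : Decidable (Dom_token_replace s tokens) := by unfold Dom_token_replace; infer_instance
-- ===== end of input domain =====

-- B replaces A's two-pointer character scan (CPython-quadratic `result += ch`) by split("$")
-- followed by one pairwise pass over the segments (measured faster; return value only, no mutation).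

-- ===== PORT A =====
-- Python's while loop as fuel recursion (fuel s.length+1 bounds the iteration count:
-- each iteration advances i or j, any raise is `none`); i, j are the Python ints (always ≥ 0 here).
def tokenReplaceLoopA (s : List Char) (tokens : List (String × String)) :
    Nat → Nat → Nat → List Char → Option (List Char)
  | 0, _, _, _ => none
  | fuel + 1, i, j, result =>
    if i < s.length then
      match PySem.List.pyGet? s (i : Int) with      -- s[i] (i < len, always succeeds)
      | none => none
      | some ci =>
        if ci ≠ '$' then
          tokenReplaceLoopA s tokens fuel (i + 1) (i + 2) (result ++ [ci])
        else
          match PySem.List.pyGet? s (j : Int) with  -- s[j]; none = IndexError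
          | none => none
          | some cj =>
            if cj ≠ '$' then
              tokenReplaceLoopA s tokens fuel i (j + 1) result
            else
              -- word = s[i:j+1]; tokens[word]; none = KeyError
              match PySem.Dict.get? (PySem.Dict.mk tokens)
                      (String.mk (PySem.List.slice s (some (i : Int)) (some ((j : Int) + 1)))) with
              | none => none
              | some w => tokenReplaceLoopA s tokens fuel (j + 1) (j + 2) (result ++ w.toList)
    else
      some result

def token_replace (s : String) (tokens : List (String × String)) : String :=
  match tokenReplaceLoopA s.toList tokens (s.toList.length + 1) 0 1 [] with
  | some r => String.mk r
  | none => ""   -- unreachable under Pre_ (Python raises here)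

-- ===== PORT B =====
def token_replace_alt (s : String) (tokens : List (String × String)) : String :=
  let parts := PySem.Chars.splitOn s.toList ['$']        -- parts = s.split("$")
  let pieces0 : List (List Char) := [PySem.List.pyGetD parts 0 []]   -- pieces = [parts[0]] (split is never empty)
  let r := (PySem.List.pyRange 1 (parts.length : Int) 2).foldl       -- for i in range(1, len(parts), 2)
    (fun (acc : Option (List (List Char))) (i : Int) =>
      acc.bind fun pieces =>
        (PySem.List.pyGet? parts (i + 1)).bind fun nxt =>            -- nxt = parts[i+1]; none = IndexError
          (PySem.List.pyGet? parts i).bind fun cur =>                -- parts[i] (always in range)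
            (PySem.Dict.get? (PySem.Dict.mk tokens)
                (String.mk ('$' :: cur ++ ['$']))).map fun w =>      -- tokens["$"+parts[i]+"$"]; none = KeyError
              pieces ++ [w.toList, nxt])
    (some pieces0)
  match r with
  | some pieces => String.mk (PySem.Chars.join [] pieces)            -- "".join(pieces)
  | none => ""   -- unreachable under Pre_ (Python raises here)

-- ===== PRECONDITION & SPEC =====
-- Pre_ = exactly the inputs where Python A returns: an even number of '$' (odd number of split
-- segments; otherwise IndexError) and every "$seg$" token present in the dict (otherwise KeyError).
-- (The ports happen to agree even outside Pre_ — both map a raise to "" — so the proof below does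
-- not need the hypothesis; Pre_ marks where the Pythons actually return.)
def Pre_token_replace (s : String) (tokens : List (String × String)) : Prop :=
  let parts := PySem.Chars.splitOn s.toList ['$']
  parts.length % 2 = 1 ∧
  ∀ k ∈ List.range parts.length, k % 2 = 1 →
    (PySem.Dict.get? (PySem.Dict.mk tokens)
      (String.mk ('$' :: parts.getD k [] ++ ['$']))).isSome = true
instance (s : String) (tokens : List (String × String)) : Decidable (Pre_token_replace s tokens) := by
  unfold Pre_token_replace; infer_instance

def pvWitness_token_replace : String × (List (String × String)) :=
  ("see $x$.", [("$x$", "there"), ("$y$", "here")])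

def Spec_token_replace (s : String) (tokens : List (String × String)) (out : String) : Prop := out = token_replace_alt s tokens
instance (s : String) (tokens : List (String × String)) (out : String) : Decidable (Spec_token_replace s tokens out) := by unfold Spec_token_replace; infer_instance

-- ===== CLAIM (what is proved, stated in full; the proofs are below) =====
def Claim_equal_token_replace : Prop := ∀ (s : String) (tokens : List (String × String)), Dom_token_replace s tokens → Pre_token_replace s tokens → Spec_token_replace s tokens (token_replace s tokens)

-- ===== LEMMAS AND PROOFS =====

-- Common functional specification g: what both programs compute (none = an exception).
mutual
def gSpec (tokens : List (String × String)) : List Char → Option (List Char)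
  | [] => some []
  | c :: r =>
    if c = '$' then gScan tokens r []
    else (gSpec tokens r).map (c :: ·)
  termination_by cs => cs.length * 2
def gScan (tokens : List (String × String)) : List Char → List Char → Option (List Char)
  | [], _ => none
  | c :: r, mid =>
    if c = '$' then
      (PySem.Dict.get? (PySem.Dict.mk tokens)
          (String.mk ('$' :: mid.reverse ++ ['$']))).bind fun w =>
        (gSpec tokens r).map (w.toList ++ ·)
    else gScan tokens r (c :: mid)
  termination_by cs _ => cs.length * 2 + 1
end

-- mySplit cs = cs.split("$") (characterization of PySem.Chars.splitOn for the one-char separator)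
def mySplit : List Char → List (List Char)
  | [] => [[]]
  | c :: r => if c = '$' then [] :: mySplit r else (mySplit r).modifyHead (c :: ·)

-- pairwise consumption of the segment list after the first segment (B's loop body, two at a time)
def prPairs (tokens : List (String × String)) : List (List Char) → Option (List (List Char))
  | [] => some []
  | [_] => none
  | x :: y :: t =>
    (PySem.Dict.get? (PySem.Dict.mk tokens) (String.mk ('$' :: x ++ ['$']))).bind fun w =>
      (prPairs tokens t).map (fun l => w.toList :: y :: l)

lemma mySplit_ne_nil (cs : List Char) : mySplit cs ≠ [] := by
  induction cs with
  | nil => simp [mySplit]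
  | cons c r ih =>
    simp only [mySplit]
    split
    · simp
    · cases h : mySplit r with
      | nil => exact absurd h ih
      | cons a t => simp

lemma splitOn_go_eq (fuel : Nat) :
    ∀ (l cur : List Char) (acc : List (List Char)), l.length < fuel →
      PySem.Chars.splitOn.go ['$'] fuel l cur acc =
        acc.reverse ++ (mySplit l).modifyHead (cur.reverse ++ ·) := by
  induction fuel with
  | zero => intro l cur acc h; omega
  | succ f ih =>
    intro l cur acc h
    cases l with
    | nil => simp [PySem.Chars.splitOn.go, mySplit]
    | cons c r =>
      by_cases hc : c = '$'
      · subst hc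
        simp only [PySem.Chars.splitOn.go, List.isPrefixOf, List.length_cons] at *
        rw [if_pos (by simp)]
        rw [ih _ _ _ (by simpa using Nat.lt_of_succ_lt_succ h)]
        simp only [mySplit]
        cases hm : mySplit r with
        | nil => exact absurd hm (mySplit_ne_nil r)
        | cons a t => simp [hm]
      · simp only [PySem.Chars.splitOn.go, List.isPrefixOf, List.length_cons] at *
        rw [if_neg (by simp [Ne.symm hc])]
        rw [ih _ _ _ (by omega)]
        simp only [mySplit, if_neg hc]
        cases hm : mySplit r with
        | nil => exact absurd hm (mySplit_ne_nil r)
        | cons a t => simp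

lemma splitOn_eq_mySplit (cs : List Char) :
    PySem.Chars.splitOn cs ['$'] = mySplit cs := by
  rw [PySem.Chars.splitOn, splitOn_go_eq (cs.length + 1) cs [] [] (by omega)]
  cases h : mySplit cs with
  | nil => exact absurd h (mySplit_ne_nil cs)
  | cons a t => simp

-- g in terms of the split segments
lemma gSpec_eq_prPairs (tokens : List (String × String)) : ∀ (n : Nat),
    (∀ cs : List Char, cs.length ≤ n →
      gSpec tokens cs =
        (prPairs tokens (mySplit cs).tail).map
          (fun l => (mySplit cs).headI ++ l.flatten)) ∧
    (∀ cs mid : List Char, cs.length ≤ n →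
      gScan tokens cs mid =
        (prPairs tokens ((mySplit cs).modifyHead (mid.reverse ++ ·))).map
          (fun l => l.flatten)) := by
  intro n
  induction n using Nat.strong_induction_on with
  | _ n IH =>
    constructor
    · intro cs hlen
      cases cs with
      | nil => simp [gSpec, mySplit, prPairs]
      | cons c r =>
        have hn : 0 < n := by simp at hlen; omega
        have hr : r.length ≤ n - 1 := by simp at hlen; omega
        by_cases hc : c = '$'
        · subst hc
          rw [gSpec, if_pos rfl, (IH (n-1) (by omega)).2 r [] hr]
          simp only [mySplit, List.reverse_nil, List.headI, List.tail]
          cases hm : mySplit r with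
          | nil => exact absurd hm (mySplit_ne_nil r)
          | cons h t => simp
        · rw [gSpec, if_neg hc, (IH (n-1) (by omega)).1 r hr]
          simp only [mySplit, if_neg hc]
          cases hm : mySplit r with
          | nil => exact absurd hm (mySplit_ne_nil r)
          | cons h t =>
            simp only [List.modifyHead_cons, List.headI, List.tail]
            cases prPairs tokens t <;> simp
    · intro cs mid hlen
      cases cs with
      | nil => simp [gScan, mySplit, prPairs]
      | cons c r =>
        have hn : 0 < n := by simp at hlen; omega
        have hr : r.length ≤ n - 1 := by simp at hlen; omega
        by_cases hc : c = '$'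
        · subst hc
          rw [gScan, if_pos rfl]
          simp only [mySplit]
          cases hm : mySplit r with
          | nil => exact absurd hm (mySplit_ne_nil r)
          | cons h t =>
            rw [(IH (n-1) (by omega)).1 r hr, hm]
            simp only [List.headI, List.tail]
            cases hg : PySem.Dict.get? (PySem.Dict.mk tokens) (String.mk ('$' :: mid.reverse ++ ['$'])) with
            | none => rw [List.cons_append] at hg; simp [prPairs, hg]
            | some w => rw [List.cons_append] at hg; cases hp : prPairs tokens t <;> simp [prPairs, hg, hp]
        · rw [gScan, if_neg hc, (IH (n-1) (by omega)).2 r (c :: mid) hr]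
          simp only [mySplit, if_neg hc, List.reverse_cons]
          cases hm : mySplit r with
          | nil => exact absurd hm (mySplit_ne_nil r)
          | cons h t => simp

-- ===== A-side: the two-pointer loop computes g =====

lemma drop_getElem? (s rest : List Char) (i : Nat) (h : s.drop i = rest) : s[i]? = rest.head? := by
  rw [← List.head?_drop, h]

lemma loopA_eq_gSpec (s : List Char) (tokens : List (String × String)) : ∀ (n : Nat),
    (∀ (rest : List Char) (i : Nat) (acc : List Char) (fuel : Nat),
      rest.length ≤ n → s.drop i = rest → rest.length < fuel →
      tokenReplaceLoopA s tokens fuel i (i + 1) acc = (gSpec tokens rest).map (acc ++ ·)) ∧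
    (∀ (r2 mid : List Char) (i : Nat) (acc : List Char) (fuel : Nat),
      r2.length ≤ n → s.drop i = '$' :: (mid.reverse ++ r2) → r2.length < fuel →
      tokenReplaceLoopA s tokens fuel i (i + 1 + mid.length) acc =
        (gScan tokens r2 mid).map (acc ++ ·)) := by
  intro n
  induction n using Nat.strong_induction_on with
  | _ n IH =>
    constructor
    · intro rest i acc fuel hlen hdrop hfuel
      obtain ⟨f, rfl⟩ : ∃ f, fuel = f + 1 := ⟨fuel - 1, by omega⟩
      cases rest with
      | nil =>
        have hi : s.length ≤ i := List.drop_eq_nil_iff.mp hdrop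
        simp [tokenReplaceLoopA, Nat.not_lt.mpr hi, gSpec]
      | cons c r =>
        have hi : i < s.length := by
          by_contra hle
          rw [List.drop_eq_nil_iff.mpr (by omega)] at hdrop; exact absurd hdrop (by simp)
        have hget : PySem.List.pyGet? s (i : Int) = some c := by
          rw [PySem.List.pyGet?_natCast, drop_getElem? s _ i hdrop]; rfl
        have hn : 0 < n := by simp at hlen; omega
        have hr : r.length ≤ n - 1 := by simp at hlen; omega
        by_cases hc : c = '$'
        · subst hc
          have hsc := (IH (n - 1) (by omega)).2 r [] i acc (f + 1)
            hr (by simpa using hdrop) (by simp at hfuel ⊢; omega)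
          simp only [List.length_nil, Nat.add_zero] at hsc
          rw [hsc, gSpec, if_pos rfl]
        · rw [tokenReplaceLoopA, if_pos hi, hget]
          simp only [ne_eq, hc, not_false_eq_true, if_true]
          have hdr : List.drop (i + 1) s = r := by
            have h := congrArg (List.drop 1) hdrop
            rw [List.drop_drop] at h
            simpa using h
          have hmain := (IH (n - 1) (by omega)).1 r (i + 1) (acc ++ [c]) f hr hdr
            (by simp at hfuel; omega)
          rw [show i + 2 = i + 1 + 1 by omega, hmain, gSpec, if_neg hc]
          cases gSpec tokens r <;> simp
    · intro r2 mid i acc fuel hlen hdrop hfuel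
      obtain ⟨f, rfl⟩ : ∃ f, fuel = f + 1 := ⟨fuel - 1, by omega⟩
      have hi : i < s.length := by
        by_contra hle
        rw [List.drop_eq_nil_iff.mpr (by omega)] at hdrop; exact absurd hdrop (by simp)
      have hget : PySem.List.pyGet? s (i : Int) = some '$' := by
        rw [PySem.List.pyGet?_natCast, drop_getElem? s _ i hdrop]; rfl
      have hdropj : s.drop (i + 1 + mid.length) = r2 := by
        have h1 : List.drop (i + 1) s = mid.reverse ++ r2 := by
          have h := congrArg (List.drop 1) hdrop
          rw [List.drop_drop] at h
          simpa using h
        rw [← List.drop_drop, h1, List.drop_left' (by simp)]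
      cases r2 with
      | nil =>
        have hgj : PySem.List.pyGet? s ((i + 1 + mid.length : Nat) : Int) = none := by
          rw [PySem.List.pyGet?_natCast, drop_getElem? s _ _ hdropj]; rfl
        rw [tokenReplaceLoopA, if_pos hi, hget]
        simp only [ne_eq, not_true_eq_false, if_false, hgj]
        simp [gScan]
      | cons c r2' =>
        have hn : 0 < n := by simp at hlen; omega
        have hr : r2'.length ≤ n - 1 := by simp at hlen; omega
        have hgj : PySem.List.pyGet? s ((i + 1 + mid.length : Nat) : Int) = some c := by
          rw [PySem.List.pyGet?_natCast, drop_getElem? s _ _ hdropj]; rfl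
        rw [tokenReplaceLoopA, if_pos hi, hget]
        simp only [ne_eq, not_true_eq_false, if_false, hgj]
        by_cases hc : c = '$'
        · subst hc
          simp only [not_true_eq_false, if_false]
          have hslice : PySem.List.slice s (some (i : Int)) (some (((i + 1 + mid.length : Nat) : Int) + 1))
              = '$' :: mid.reverse ++ ['$'] := by
            have hcast : (((i + 1 + mid.length : Nat) : Int) + 1) = ((i + mid.length + 2 : Nat) : Int) := by
              push_cast; ring
            rw [hcast, PySem.List.slice_natCast, hdrop,
              show i + mid.length + 2 - i = mid.length + 2 by omega,
              List.take_succ_cons, List.take_append]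
            simp
          rw [hslice, gScan, if_pos rfl]
          cases hg : PySem.Dict.get? (PySem.Dict.mk tokens) (String.mk ('$' :: mid.reverse ++ ['$'])) with
          | none => rw [List.cons_append] at hg; simp
          | some w =>
            rw [List.cons_append] at hg
            simp only [Option.bind_some]
            have hdr2 : List.drop (i + 1 + mid.length + 1) s = r2' := by
              have h := congrArg (List.drop 1) hdropj
              rw [List.drop_drop] at h
              simpa using h
            have hmain := (IH (n - 1) (by omega)).1 r2' (i + 1 + mid.length + 1)
              (acc ++ w.toList) f hr hdr2 (by simp at hfuel; omega)
            rw [show i + 1 + mid.length + 2 = i + 1 + mid.length + 1 + 1 by omega, hmain]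
            cases gSpec tokens r2' <;> simp
        · rw [if_pos hc]
          have hsc := (IH (n - 1) (by omega)).2 r2' (c :: mid) i acc f hr
            (by rw [hdrop]; simp) (by simp at hfuel; omega)
          rw [show (c :: mid).length = mid.length + 1 from rfl] at hsc
          rw [show i + 1 + mid.length + 1 = i + 1 + (mid.length + 1) by omega, hsc, gScan, if_neg hc]

-- ===== B-side: the fold over odd indices is the pairwise pass =====

lemma pyRange_two_nil (k n : Int) (h : n ≤ k) : PySem.List.pyRange k n 2 = [] := by
  rw [PySem.List.pyRange_of_pos _ _ (by norm_num)]
  rw [if_neg (by omega)]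
  simp

lemma pyRange_two_cons (k n : Int) (h : k < n) :
    PySem.List.pyRange k n 2 = k :: PySem.List.pyRange (k + 2) n 2 := by
  rw [PySem.List.pyRange_of_pos _ _ (by norm_num),
      PySem.List.pyRange_of_pos _ _ (by norm_num)]
  rw [if_pos h]
  by_cases h2 : k + 2 < n
  · rw [if_pos h2]
    rw [show ((n - k + 2 - 1) / 2).toNat = ((n - (k + 2) + 2 - 1) / 2).toNat + 1 by omega]
    rw [List.range_succ_eq_map]
    simp [Function.comp_def]
    intro a _; ring
  · rw [if_neg h2]
    rw [show ((n - k + 2 - 1) / 2).toNat = 1 by omega]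
    simp [List.range_succ]

lemma foldB_none (parts : List (List Char)) (tokens : List (String × String)) (l : List Int) :
    l.foldl
      (fun (a : Option (List (List Char))) (i : Int) =>
        a.bind fun pieces =>
          (PySem.List.pyGet? parts (i + 1)).bind fun nxt =>
            (PySem.List.pyGet? parts i).bind fun cur =>
              (PySem.Dict.get? (PySem.Dict.mk tokens)
                  (String.mk ('$' :: cur ++ ['$']))).map fun w =>
                pieces ++ [w.toList, nxt])
      none = none := by
  induction l with
  | nil => rfl
  | cons x l ih => simpa using ih

lemma foldB_eq_prPairs (parts : List (List Char)) (tokens : List (String × String)) :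
    ∀ (n : Nat) (t : List (List Char)) (k : Nat) (acc : List (List Char)),
      t.length ≤ n → parts.drop k = t →
      (PySem.List.pyRange (k : Int) (parts.length : Int) 2).foldl
        (fun (a : Option (List (List Char))) (i : Int) =>
          a.bind fun pieces =>
            (PySem.List.pyGet? parts (i + 1)).bind fun nxt =>
              (PySem.List.pyGet? parts i).bind fun cur =>
                (PySem.Dict.get? (PySem.Dict.mk tokens)
                    (String.mk ('$' :: cur ++ ['$']))).map fun w =>
                  pieces ++ [w.toList, nxt])
        (some acc)
      = (prPairs tokens t).map (fun l => acc ++ l) := by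
  intro n
  induction n using Nat.strong_induction_on with
  | _ n IH =>
    intro t k acc hlen hdrop
    cases t with
    | nil =>
      have hk : parts.length ≤ k := List.drop_eq_nil_iff.mp hdrop
      rw [pyRange_two_nil _ _ (by exact_mod_cast hk)]
      simp [prPairs]
    | cons x t1 =>
      have hk : k < parts.length := by
        by_contra hle
        rw [List.drop_eq_nil_iff.mpr (by omega)] at hdrop; exact absurd hdrop (by simp)
      rw [pyRange_two_cons _ _ (by exact_mod_cast hk)]
      rw [List.foldl_cons]
      have hx : PySem.List.pyGet? parts (k : Int) = some x := by
        rw [PySem.List.pyGet?_natCast, ← List.head?_drop, hdrop]; rfl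
      have hnxt : PySem.List.pyGet? parts ((k : Int) + 1) = parts[k + 1]? := by
        rw [show (k : Int) + 1 = ((k + 1 : Nat) : Int) by push_cast; ring, PySem.List.pyGet?_natCast]
      cases t1 with
      | nil =>
        have h1 : parts[k + 1]? = none := by
          rw [← List.head?_drop, show k + 1 = k + 1 from rfl,
            show List.drop (k+1) parts = List.drop 1 (List.drop k parts) by rw [List.drop_drop, Nat.add_comm],
            hdrop]
          rfl
        rw [hnxt] at *
        simp only [Option.bind_some, h1, Option.bind_none, hx]
        rw [foldB_none]
        simp [prPairs]
      | cons y t2 =>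
        have h1 : parts[k + 1]? = some y := by
          rw [← List.head?_drop,
            show List.drop (k+1) parts = List.drop 1 (List.drop k parts) by rw [List.drop_drop, Nat.add_comm],
            hdrop]
          rfl
        have hd2 : parts.drop (k + 2) = t2 := by
          rw [show List.drop (k+2) parts = List.drop 2 (List.drop k parts) by rw [List.drop_drop, Nat.add_comm],
            hdrop]
          rfl
        have hn : t2.length ≤ n - 1 := by simp at hlen; omega
        have hn0 : 0 < n := by simp at hlen; omega
        rw [hnxt]
        simp only [Option.bind_some, h1, hx]
        cases hg : PySem.Dict.get? (PySem.Dict.mk tokens) (String.mk ('$' :: x ++ ['$'])) with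
        | none =>
          rw [List.cons_append] at hg
          simp only [Option.map_none]
          rw [foldB_none]
          simp [prPairs, hg]
        | some w =>
          rw [List.cons_append] at hg
          simp only [Option.map_some]
          have := IH (n - 1) (by omega) t2 (k + 2) (acc ++ [w.toList, y]) hn hd2
          rw [show ((k + 2 : Nat) : Int) = (k : Int) + 2 by push_cast; ring] at this
          rw [this]
          simp only [prPairs]
          cases prPairs tokens t2 <;> simp [hg]

lemma join_nil_flatten (ps : List (List Char)) : PySem.Chars.join [] ps = ps.flatten := by
  rw [PySem.Chars.join]
  induction ps with
  | nil => rfl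
  | cons h t ih => cases t <;> simp_all [List.intersperse, List.intercalate]

lemma tokenA_eq_g (s : String) (tokens : List (String × String)) :
    token_replace s tokens =
      match gSpec tokens s.toList with
      | some r => String.mk r
      | none => "" := by
  rw [token_replace]
  rw [show (1 : Nat) = 0 + 1 from rfl]
  rw [(loopA_eq_gSpec s.toList tokens s.toList.length).1 s.toList 0 [] (s.toList.length + 1)
    le_rfl (by simp) (by omega)]
  cases gSpec tokens s.toList <;> simp

lemma tokenB_eq_g (s : String) (tokens : List (String × String)) :
    token_replace_alt s tokens =
      match gSpec tokens s.toList with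
      | some r => String.mk r
      | none => "" := by
  simp only [token_replace_alt, splitOn_eq_mySplit]
  cases hm : mySplit s.toList with
  | nil => exact absurd hm (mySplit_ne_nil s.toList)
  | cons h t =>
    rw [show PySem.List.pyRange 1 (((h :: t).length : Nat) : Int) 2
          = PySem.List.pyRange (((1 : Nat) : Int)) (((h :: t).length : Nat) : Int) 2 by norm_num]
    rw [foldB_eq_prPairs (h :: t) tokens t.length t 1 [PySem.List.pyGetD (h :: t) 0 []]
      le_rfl (by simp)]
    rw [(gSpec_eq_prPairs tokens s.toList.length).1 s.toList le_rfl, hm]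
    simp only [List.headI, List.tail]
    have hh : PySem.List.pyGetD (h :: t) (0 : Int) [] = h := by
      simp [PySem.List.pyGetD_of_nonneg]
    rw [hh]
    cases prPairs tokens t <;> simp [join_nil_flatten]

-- ===== VERDICT (by name: the statement is the Claim_ definition above) =====
theorem token_replace_spec : Claim_equal_token_replace := by
  intro s tokens _ _
  unfold Spec_token_replace
  rw [tokenA_eq_g, tokenB_eq_g]
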